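-- pv_equiv track=rewrite | github.com/vkbo/makeNovel | mknov/input/parser.py | isObject
-- ===== SOURCE A (Python) =====
-- def isObject(testVal):
--     """
--     Checks if a string is a valid object name, that is: starts with a character [a-zA-Z],
--     and only contains [a-zA-Z0-9_].
--     """
--     sFirst = "abcdefghijklmnopqrstuvwxyzABCDEFGHIJKLMNOPQRSTUVWXYZ"
--     sValid = sFirst+"0123456789_"
--     nChar  = len(testVal)
--     if nChar == 0: return False
--     if testVal[0] not in sFirst: return False
--     for i in range(1,nChar):
--         if testVal[i] not in sValid: return False
--     return True
-- ===== SOURCE B (Python) =====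
-- import re
--
-- _OBJ_RE = re.compile(r'[A-Za-z][A-Za-z0-9_]*')
--
-- def isObject(testVal):
--     """
--     Checks if a string is a valid object name, that is: starts with a character [a-zA-Z],
--     and only contains [a-zA-Z0-9_].
--     """
--     return bool(_OBJ_RE.fullmatch(testVal))
-- ===== Notes on version B (the rewrite author's own statement) =====
-- stated objective: idiomatic
-- what changed: Replaced the manual first-character membership test plus an index loop over the tail with a single precompiled anchored ASCII regular expression fullmatch.
import Mathlib
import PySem

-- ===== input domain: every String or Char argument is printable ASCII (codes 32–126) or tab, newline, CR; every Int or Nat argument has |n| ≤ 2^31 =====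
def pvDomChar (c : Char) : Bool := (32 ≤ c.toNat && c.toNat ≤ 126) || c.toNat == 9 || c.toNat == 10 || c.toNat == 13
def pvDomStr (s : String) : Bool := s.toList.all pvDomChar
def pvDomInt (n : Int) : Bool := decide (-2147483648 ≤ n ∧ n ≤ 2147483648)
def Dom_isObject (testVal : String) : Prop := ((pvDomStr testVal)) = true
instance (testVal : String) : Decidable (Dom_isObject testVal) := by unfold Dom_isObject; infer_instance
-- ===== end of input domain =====

set_option maxRecDepth 16000

-- B replaces A's manual first-character check plus index loop with one anchored ASCII regex fullmatch (objective: idiomatic; return value only, no side effects involved).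

-- ===== PORT A =====
-- 'c in s' on a 1-char probe is character membership, ported as contains on the string's char list (exact here since every probed value is a single char).
def isObject (testVal : String) : Bool :=
  let sFirst := "abcdefghijklmnopqrstuvwxyzABCDEFGHIJKLMNOPQRSTUVWXYZ".toList
  let sValid := sFirst ++ "0123456789_".toList
  let cs := testVal.toList
  let nChar : Int := (cs.length : Int)
  if nChar == 0 then false
  else if !(sFirst.contains (PySem.List.pyGetD cs 0 ' ')) then false
  else (PySem.List.pyRange 1 nChar 1).all (fun i => sValid.contains (PySem.List.pyGetD cs i ' '))

-- ===== PORT B =====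
-- Source B matches the anchored regex [A-Za-z][A-Za-z0-9_]*; the port transcribes that
-- regex's semantics: first char in the class [A-Za-z], every remaining char in [A-Za-z0-9_].
def pvAlpha (c : Char) : Bool := ('A' ≤ c && c ≤ 'Z') || ('a' ≤ c && c ≤ 'z')
def pvWord (c : Char) : Bool := pvAlpha c || ('0' ≤ c && c ≤ '9') || c == '_'

def isObject_alt (testVal : String) : Bool :=
  match testVal.toList with
  | [] => false
  | c :: rest => pvAlpha c && rest.all pvWord

-- ===== PRECONDITION & SPEC =====
def Spec_isObject (testVal : String) (out : Bool) : Prop := out = isObject_alt testVal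
instance (testVal : String) (out : Bool) : Decidable (Spec_isObject testVal out) := by unfold Spec_isObject; infer_instance

-- ===== CLAIM (what is proved, stated in full; the proofs are below) =====
def Claim_equal_isObject : Prop := ∀ (testVal : String), Dom_isObject testVal → Spec_isObject testVal (isObject testVal)

-- ===== LEMMAS AND PROOFS =====
lemma char_eq_iff (c d : Char) : c = d ↔ c.toNat = d.toNat := eq_iff_eq_of_cmp_eq_cmp rfl
lemma char_le_iff (c d : Char) : c ≤ d ↔ c.toNat ≤ d.toNat := ge_iff_le

lemma mem_first (c : Char) :
    ("abcdefghijklmnopqrstuvwxyzABCDEFGHIJKLMNOPQRSTUVWXYZ".toList).contains c = pvAlpha c := by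
  rw [show "abcdefghijklmnopqrstuvwxyzABCDEFGHIJKLMNOPQRSTUVWXYZ".toList =
    ['a','b','c','d','e','f','g','h','i','j','k','l','m','n','o','p','q','r','s','t','u','v','w','x','y','z','A','B','C','D','E','F','G','H','I','J','K','L','M','N','O','P','Q','R','S','T','U','V','W','X','Y','Z'] from by decide,
    Bool.eq_iff_iff]
  simp [pvAlpha, char_eq_iff, char_le_iff]
  omega

lemma mem_valid (c : Char) :
    (("abcdefghijklmnopqrstuvwxyzABCDEFGHIJKLMNOPQRSTUVWXYZ".toList
      ++ "0123456789_".toList).contains c) = pvWord c := by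
  rw [show ("abcdefghijklmnopqrstuvwxyzABCDEFGHIJKLMNOPQRSTUVWXYZ".toList ++ "0123456789_".toList) =
    ['a','b','c','d','e','f','g','h','i','j','k','l','m','n','o','p','q','r','s','t','u','v','w','x','y','z','A','B','C','D','E','F','G','H','I','J','K','L','M','N','O','P','Q','R','S','T','U','V','W','X','Y','Z','0','1','2','3','4','5','6','7','8','9','_'] from by decide,
    Bool.eq_iff_iff]
  simp [pvWord, pvAlpha, char_eq_iff, char_le_iff]
  omega

lemma loop_eq (cs : List Char) (p : Char → Bool) :
    (PySem.List.pyRange 1 (cs.length : Int) 1).all (fun i => p (PySem.List.pyGetD cs i ' '))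
      = (cs.drop 1).all p := by
  have h := PySem.List.map_pyGetD_pyRange' (xs := cs) (a := 1) (d := ' ') (by omega)
  calc (PySem.List.pyRange 1 (cs.length : Int) 1).all (fun i => p (PySem.List.pyGetD cs i ' '))
      = ((PySem.List.pyRange 1 (cs.length : Int) 1).map (fun i => PySem.List.pyGetD cs i ' ')).all p := by
        rw [List.all_map]; rfl
    _ = (cs.drop 1).all p := by rw [h]; rfl

-- ===== VERDICT (by name: the statement is the Claim_ definition above) =====
theorem isObject_spec : Claim_equal_isObject := by
  intro testVal _
  unfold Spec_isObject isObject isObject_alt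
  cases h : testVal.toList with
  | nil => simp
  | cons c rest =>
    simp only [loop_eq (c :: rest), PySem.List.pyGetD_zero_cons, mem_first,
      List.drop_succ_cons, List.drop_zero]
    rw [show ("abcdefghijklmnopqrstuvwxyzABCDEFGHIJKLMNOPQRSTUVWXYZ".toList
        ++ "0123456789_".toList).contains = pvWord from funext mem_valid]
    have hz : (((c :: rest).length : Int) == 0) = false := by
      simp
      omega
    rw [hz]
    cases pvAlpha c <;> simp
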